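-- pv_equiv track=rewrite | github.com/jintak0401/Problem_Solving | 1981.py | bfs
-- ===== SOURCE A (Python) =====
-- from collections import deque
--
-- def bfs(arr, down, up):
--
--     if not (down <= arr[0][0] <= up and down <= arr[-1][-1] <= up):
--         return False
--
--     d = [(1, 0), (-1, 0), (0, 1), (0, -1)]
--     q = deque([(0, 0)])
--     visited = set([(0, 0)])
--     target = (len(arr) - 1, len(arr[0]) - 1)
--
--     while q:
--         pt = q.pop()
--         if pt == target:
--             return True
--         for dx, dy in d:
--             x, y = pt[0] + dx, pt[1] + dy
--             if 0 <= x < len(arr) and 0 <= y < len(arr[0]):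
--                 if down <= arr[x][y] <= up and (x, y) not in visited:
--                     q.append((x, y))
--                     visited.add((x, y))
--
--     return False
-- ===== SOURCE B (Python) =====
-- def bfs(arr, down, up):
--     if not (down <= arr[0][0] <= up and down <= arr[-1][-1] <= up):
--         return False
--
--     rows, cols = len(arr), len(arr[0])
--     reach = {(0, 0)}
--
--     # label propagation: sweep the whole grid, marking any in-range cell
--     # adjacent to an already-marked cell, until a sweep adds nothing.
--     for _ in range(rows * cols):
--         before = len(reach)
--         for x in range(rows):
--             for y in range(cols):
--                 if down <= arr[x][y] <= up and (
--                         (x - 1, y) in reach or (x + 1, y) in reach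
--                         or (x, y - 1) in reach or (x, y + 1) in reach):
--                     reach.add((x, y))
--         if len(reach) == before:
--             break
--
--     return (rows - 1, cols - 1) in reach
-- ===== Notes on version B (the rewrite author's own statement) =====
-- stated objective: alternative
-- what changed: A's queue-based frontier search (deque + visited set, popping cells and expanding neighbours) is replaced by frontier-free label propagation: whole-grid sweeps that mark any in-range cell adjacent to an already-marked cell, iterated until a sweep adds nothing, then a single membership query of the bottom-right cell.
-- outside the precondition, e.g. on bfs([[1, 3], [9], [1, 1]], 1, 1): A returns False, B raises IndexError
import Mathlib
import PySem

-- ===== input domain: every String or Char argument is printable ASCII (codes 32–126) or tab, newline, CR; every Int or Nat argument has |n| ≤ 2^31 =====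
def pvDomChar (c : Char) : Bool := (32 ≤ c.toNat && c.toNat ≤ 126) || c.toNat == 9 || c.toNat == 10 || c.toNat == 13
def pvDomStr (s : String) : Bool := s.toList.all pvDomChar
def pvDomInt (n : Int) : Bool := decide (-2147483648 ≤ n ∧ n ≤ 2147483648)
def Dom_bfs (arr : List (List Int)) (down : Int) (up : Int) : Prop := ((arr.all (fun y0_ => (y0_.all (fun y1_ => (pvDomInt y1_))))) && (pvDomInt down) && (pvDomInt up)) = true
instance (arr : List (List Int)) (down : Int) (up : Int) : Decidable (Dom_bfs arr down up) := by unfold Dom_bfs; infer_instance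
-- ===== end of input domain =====

-- B replaces A's queue-based frontier search by frontier-free label-propagation sweeps
-- iterated to a fixpoint (objective: alternative algorithm, not faster); return values agree on Pre_.

-- ===== PORT A =====

-- arr[x][y]: total accessor (both Pythons write arr[x][y]; always in bounds where used, under Pre_)
def pyCell (arr : List (List Int)) (x y : Int) : Int :=
  PySem.List.pyGetD (PySem.List.pyGetD arr x []) y 0

-- d = [(1, 0), (-1, 0), (0, 1), (0, -1)]
def bfsDirs : List (Int × Int) := [(1, 0), (-1, 0), (0, 1), (0, -1)]

-- body of A's 'for dx, dy in d' loop: maybe push neighbour pt+(dx,dy) onto (queue, visited)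
def bfsPush (arr : List (List Int)) (down up rows cols : Int) (pt : Int × Int)
    (st : List (Int × Int) × PySem.Set (Int × Int)) (dxy : Int × Int) :
    List (Int × Int) × PySem.Set (Int × Int) :=
  let x := pt.1 + dxy.1
  let y := pt.2 + dxy.2
  if 0 ≤ x ∧ x < rows ∧ 0 ≤ y ∧ y < cols then
    if (down ≤ pyCell arr x y ∧ pyCell arr x y ≤ up) ∧ (x, y) ∉ st.2 then
      (st.1 ++ [(x, y)], PySem.Set.add st.2 (x, y))
    else st
  else st

-- A's 'while q' loop; q.pop() pops from the RIGHT of the deque; fuel bounds the loop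
-- (fuel rows*cols+1 is proved adequate below)
def bfsLoop (arr : List (List Int)) (down up rows cols : Int) (target : Int × Int) :
    Nat → List (Int × Int) → PySem.Set (Int × Int) → Bool
  | 0, _, _ => false
  | fuel + 1, q, visited =>
    match q.getLast? with
    | none => false
    | some pt =>
      if pt = target then true
      else
        let st := bfsDirs.foldl (bfsPush arr down up rows cols pt) (q.dropLast, visited)
        bfsLoop arr down up rows cols target fuel st.1 st.2

def bfs (arr : List (List Int)) (down : Int) (up : Int) : Bool :=
  if (down ≤ pyCell arr 0 0 ∧ pyCell arr 0 0 ≤ up) ∧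
     (down ≤ pyCell arr (-1) (-1) ∧ pyCell arr (-1) (-1) ≤ up) then
    bfsLoop arr down up (arr.length : Int) ((arr.headD []).length : Int)
      ((arr.length : Int) - 1, ((arr.headD []).length : Int) - 1)
      (arr.length * (arr.headD []).length + 1) [(0, 0)] (PySem.Set.ofList [(0, 0)])
  else false

-- ===== PORT B =====

-- body of B's innermost 'for y' loop: mark (x,y) if in range and adjacent to a marked cell
def sweepCell (arr : List (List Int)) (down up : Int) (x : Int)
    (r : PySem.Set (Int × Int)) (y : Int) : PySem.Set (Int × Int) :=
  if (down ≤ pyCell arr x y ∧ pyCell arr x y ≤ up) ∧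
     ((x - 1, y) ∈ r ∨ (x + 1, y) ∈ r ∨ (x, y - 1) ∈ r ∨ (x, y + 1) ∈ r) then
    PySem.Set.add r (x, y)
  else r

-- B's 'for x … for y …' double loop: one whole-grid sweep
def sweep (arr : List (List Int)) (down up rows cols : Int)
    (reach : PySem.Set (Int × Int)) : PySem.Set (Int × Int) :=
  (PySem.List.pyRange 0 rows 1).foldl
    (fun r x => (PySem.List.pyRange 0 cols 1).foldl (sweepCell arr down up x) r) reach

-- body of B's outer 'for _ in range(rows*cols)' loop, with the 'break' once a sweep
-- adds nothing modelled by a done flag threaded through the fold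
def sweepStep (arr : List (List Int)) (down up rows cols : Int)
    (st : PySem.Set (Int × Int) × Bool) (_ : Int) : PySem.Set (Int × Int) × Bool :=
  if st.2 then st
  else
    let r' := sweep arr down up rows cols st.1
    (r', r'.length == st.1.length)

def bfs_alt (arr : List (List Int)) (down : Int) (up : Int) : Bool :=
  if (down ≤ pyCell arr 0 0 ∧ pyCell arr 0 0 ≤ up) ∧
     (down ≤ pyCell arr (-1) (-1) ∧ pyCell arr (-1) (-1) ≤ up) then
    let rows : Int := arr.length
    let cols : Int := (arr.headD []).length
    let st := (PySem.List.pyRange 0 (rows * cols) 1).foldl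
      (sweepStep arr down up rows cols) (PySem.Set.ofList [(0, 0)], false)
    decide ((rows - 1, cols - 1) ∈ st.1)
  else false

-- ===== PRECONDITION & SPEC =====
-- Pre_ excludes empty grids, grids with an empty first row, and ragged grids (a row shorter than
-- the first) unless the opening guard already fails there: past the guard a short row makes both
-- programs raise IndexError, except that A's frontier search can return without ever reading the
-- missing cell while B's whole-grid sweep always reads it — those few A-returning ragged grids
-- stay excluded.
def Pre_bfs (arr : List (List Int)) (down : Int) (up : Int) : Prop :=
  arr ≠ [] ∧ arr.headD [] ≠ [] ∧
    ((∀ row ∈ arr, (arr.headD []).length ≤ row.length) ∨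
      ¬(down ≤ pyCell arr 0 0 ∧ pyCell arr 0 0 ≤ up) ∨
      (arr.getLastD [] ≠ [] ∧ ¬(down ≤ pyCell arr (-1) (-1) ∧ pyCell arr (-1) (-1) ≤ up)))
instance (arr : List (List Int)) (down : Int) (up : Int) : Decidable (Pre_bfs arr down up) := by
  unfold Pre_bfs; infer_instance

def pvWitness_bfs : List (List Int) × Int × Int := ([[0, 2], [1, 0]], 0, 1)

def Spec_bfs (arr : List (List Int)) (down : Int) (up : Int) (out : Bool) : Prop := out = bfs_alt arr down up
instance (arr : List (List Int)) (down : Int) (up : Int) (out : Bool) : Decidable (Spec_bfs arr down up out) := by unfold Spec_bfs; infer_instance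

-- ===== CLAIM (what is proved, stated in full; the proofs are below) =====
def Claim_equal_bfs : Prop := ∀ (arr : List (List Int)) (down : Int) (up : Int), Dom_bfs arr down up → Pre_bfs arr down up → Spec_bfs arr down up (bfs arr down up)

-- ===== LEMMAS AND PROOFS =====

-- cells reachable through in-range cells: the common graph both programs search
def GoodC (arr : List (List Int)) (down up : Int) (z : Int × Int) : Prop :=
  0 ≤ z.1 ∧ z.1 < (arr.length : Int) ∧ 0 ≤ z.2 ∧ z.2 < ((arr.headD []).length : Int) ∧
    down ≤ pyCell arr z.1 z.2 ∧ pyCell arr z.1 z.2 ≤ up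

def AdjC (p z : Int × Int) : Prop := ∃ d ∈ bfsDirs, z = (p.1 + d.1, p.2 + d.2)

def StepC (arr : List (List Int)) (down up : Int) (p z : Int × Int) : Prop :=
  AdjC p z ∧ GoodC arr down up z

def ReachC (arr : List (List Int)) (down up : Int) (z : Int × Int) : Prop :=
  Relation.ReflTransGen (StepC arr down up) (0, 0) z

def pvTarget (arr : List (List Int)) : Int × Int :=
  ((arr.length : Int) - 1, ((arr.headD []).length : Int) - 1)

lemma adj_rev (p z : Int × Int) :
    AdjC p z ↔ (p = (z.1 - 1, z.2) ∨ p = (z.1 + 1, z.2) ∨ p = (z.1, z.2 - 1) ∨ p = (z.1, z.2 + 1)) := by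
  obtain ⟨p1, p2⟩ := p
  obtain ⟨z1, z2⟩ := z
  constructor
  · rintro ⟨⟨d1, d2⟩, hd, hz⟩
    simp only [bfsDirs, List.mem_cons, List.not_mem_nil, or_false, Prod.mk.injEq] at hd
    simp only [Prod.mk.injEq] at hz ⊢
    rcases hd with ⟨h1, h2⟩ | ⟨h1, h2⟩ | ⟨h1, h2⟩ | ⟨h1, h2⟩ <;> subst h1 <;> subst h2 <;> omega
  · rintro (h | h | h | h) <;> simp only [Prod.mk.injEq] at h
    · exact ⟨(1, 0), by simp [bfsDirs], by simp only [Prod.mk.injEq]; omega⟩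
    · exact ⟨(-1, 0), by simp [bfsDirs], by simp only [Prod.mk.injEq]; omega⟩
    · exact ⟨(0, 1), by simp [bfsDirs], by simp only [Prod.mk.injEq]; omega⟩
    · exact ⟨(0, -1), by simp [bfsDirs], by simp only [Prod.mk.injEq]; omega⟩

lemma foldl_preserve {α β : Type} (Q : α → Prop) (f : α → β → α) :
    ∀ (l : List β), (∀ a, Q a → ∀ b ∈ l, Q (f a b)) → ∀ a, Q a → Q (l.foldl f a)
  | [], _, _, ha => ha
  | b :: l, h, a, ha => by
    simp only [List.foldl_cons]
    exact foldl_preserve Q f l (fun a' ha' b' hb' => h a' ha' b' (by simp [hb']))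
      _ (h a ha b (by simp))

lemma nodup_bounded_length (v : List (Int × Int)) (rows cols : Nat) (hnd : v.Nodup)
    (hb : ∀ p ∈ v, 0 ≤ p.1 ∧ p.1 < (rows : Int) ∧ 0 ≤ p.2 ∧ p.2 < (cols : Int)) :
    v.length ≤ rows * cols := by
  have hsub : v.toFinset ⊆ (Finset.Ico (0:ℤ) rows) ×ˢ (Finset.Ico (0:ℤ) cols) := by
    intro p hp
    have h := hb p (by simpa using hp)
    simp only [Finset.mem_product, Finset.mem_Ico]
    exact ⟨⟨h.1, h.2.1⟩, ⟨h.2.2.1, h.2.2.2⟩⟩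
  have h1 : v.toFinset.card = v.length := List.toFinset_card_of_nodup hnd
  have h2 := Finset.card_le_card hsub
  rw [h1] at h2
  simpa [Int.card_Ico] using h2

lemma fold_push_spec (arr : List (List Int)) (down up rows cols : Int) (pt : Int × Int) :
    ∀ (l : List (Int × Int)) (st : List (Int × Int) × PySem.Set (Int × Int)),
      ∃ t : List (Int × Int),
        (l.foldl (bfsPush arr down up rows cols pt) st).1 = st.1 ++ t ∧
        (l.foldl (bfsPush arr down up rows cols pt) st).2 = st.2 ++ t ∧
        (∀ z ∈ t, (∃ d ∈ l, z = (pt.1 + d.1, pt.2 + d.2)) ∧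
          (0 ≤ z.1 ∧ z.1 < rows ∧ 0 ≤ z.2 ∧ z.2 < cols ∧
            down ≤ pyCell arr z.1 z.2 ∧ pyCell arr z.1 z.2 ≤ up)) ∧
        (∀ d ∈ l,
          (0 ≤ pt.1 + d.1 ∧ pt.1 + d.1 < rows ∧ 0 ≤ pt.2 + d.2 ∧ pt.2 + d.2 < cols ∧
            down ≤ pyCell arr (pt.1 + d.1) (pt.2 + d.2) ∧ pyCell arr (pt.1 + d.1) (pt.2 + d.2) ≤ up) →
          (pt.1 + d.1, pt.2 + d.2) ∈ st.2 ++ t) ∧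
        (st.2.Nodup → (st.2 ++ t).Nodup) := by
  intro l
  induction l with
  | nil =>
    intro st
    exact ⟨[], by simp, by simp, by simp, by simp, fun h => by simpa using h⟩
  | cons d l ih =>
    intro st
    simp only [List.foldl_cons]
    by_cases hb : 0 ≤ pt.1 + d.1 ∧ pt.1 + d.1 < rows ∧ 0 ≤ pt.2 + d.2 ∧ pt.2 + d.2 < cols
    · by_cases hc : (down ≤ pyCell arr (pt.1 + d.1) (pt.2 + d.2) ∧
          pyCell arr (pt.1 + d.1) (pt.2 + d.2) ≤ up) ∧ (pt.1 + d.1, pt.2 + d.2) ∉ st.2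
      · -- the neighbour is pushed
        have hpush : bfsPush arr down up rows cols pt st d =
            (st.1 ++ [(pt.1 + d.1, pt.2 + d.2)],
              PySem.Set.add st.2 (pt.1 + d.1, pt.2 + d.2)) := by
          unfold bfsPush
          rw [if_pos hb, if_pos hc]
        have hadd : PySem.Set.add st.2 (pt.1 + d.1, pt.2 + d.2) =
            st.2 ++ [(pt.1 + d.1, pt.2 + d.2)] := PySem.Set.add_of_not_mem hc.2
        rw [hpush, hadd]
        obtain ⟨t, h1, h2, h3, h4, h5⟩ :=
          ih (st.1 ++ [(pt.1 + d.1, pt.2 + d.2)], st.2 ++ [(pt.1 + d.1, pt.2 + d.2)])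
        refine ⟨(pt.1 + d.1, pt.2 + d.2) :: t, ?_, ?_, ?_, ?_, ?_⟩
        · rw [h1]; simp
        · rw [h2]; simp
        · intro z hz
          rcases List.mem_cons.mp hz with hz | hz
          · subst hz
            exact ⟨⟨d, by simp, rfl⟩, hb.1, hb.2.1, hb.2.2.1, hb.2.2.2, hc.1.1, hc.1.2⟩
          · obtain ⟨⟨d', hd', hzd'⟩, hrest⟩ := h3 z hz
            exact ⟨⟨d', by simp [hd'], hzd'⟩, hrest⟩
        · intro d' hd' hgood
          rcases List.mem_cons.mp hd' with hd' | hd'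
          · subst hd'
            exact List.mem_append_right _ (by simp)
          · have := h4 d' hd' hgood
            simp only at this
            rw [List.append_assoc] at this
            simpa using this
        · intro hnd
          have hnd2 : (st.2 ++ [(pt.1 + d.1, pt.2 + d.2)]).Nodup := by
            rw [← hadd]
            exact PySem.Set.nodup_add _ _ hnd
          have := h5 hnd2
          rw [List.append_assoc] at this
          simpa using this
      · -- in bounds but not pushed (out of range, or already visited)
        have hkeep : bfsPush arr down up rows cols pt st d = st := by
          unfold bfsPush
          rw [if_pos hb, if_neg hc]
        rw [hkeep]
        obtain ⟨t, h1, h2, h3, h4, h5⟩ := ih st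
        refine ⟨t, h1, h2, ?_, ?_, h5⟩
        · intro z hz
          obtain ⟨⟨d', hd', hzd'⟩, hrest⟩ := h3 z hz
          exact ⟨⟨d', by simp [hd'], hzd'⟩, hrest⟩
        · intro d' hd' hgood
          rcases List.mem_cons.mp hd' with hd' | hd'
          · subst hd'
            by_cases hm : (pt.1 + d'.1, pt.2 + d'.2) ∈ st.2
            · exact List.mem_append_left _ hm
            · exact absurd ⟨⟨hgood.2.2.2.2.1, hgood.2.2.2.2.2⟩, hm⟩ hc
          · exact h4 d' hd' hgood
    · -- neighbour out of the grid
      have hkeep : bfsPush arr down up rows cols pt st d = st := by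
        unfold bfsPush
        rw [if_neg hb]
      rw [hkeep]
      obtain ⟨t, h1, h2, h3, h4, h5⟩ := ih st
      refine ⟨t, h1, h2, ?_, ?_, h5⟩
      · intro z hz
        obtain ⟨⟨d', hd', hzd'⟩, hrest⟩ := h3 z hz
        exact ⟨⟨d', by simp [hd'], hzd'⟩, hrest⟩
      · intro d' hd' hgood
        rcases List.mem_cons.mp hd' with hd' | hd'
        · subst hd'
          exact absurd ⟨hgood.1, hgood.2.1, hgood.2.2.1, hgood.2.2.2.1⟩ hb
        · exact h4 d' hd' hgood

lemma loop_true_reach (arr : List (List Int)) (down up : Int) :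
    ∀ (fuel : Nat) (q : List (Int × Int)) (v : PySem.Set (Int × Int)),
      (∀ p ∈ q, ReachC arr down up p) →
      bfsLoop arr down up (arr.length : Int) ((arr.headD []).length : Int) (pvTarget arr) fuel q v = true →
      ReachC arr down up (pvTarget arr) := by
  intro fuel
  induction fuel with
  | zero => intro q v _ h; simp [bfsLoop] at h
  | succ fuel ih =>
    intro q v hq h
    rw [bfsLoop] at h
    cases hlast : q.getLast? with
    | none => rw [hlast] at h; simp at h
    | some pt =>
      rw [hlast] at h
      dsimp only at h
      have hptq : pt ∈ q := List.mem_of_getLast? hlast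
      by_cases htgt : pt = pvTarget arr
      · rw [← htgt]
        exact hq pt hptq
      · rw [if_neg htgt] at h
        obtain ⟨t, h1, h2, h3, h4, h5⟩ := fold_push_spec arr down up
          (arr.length : Int) ((arr.headD []).length : Int) pt bfsDirs (q.dropLast, v)
        refine ih _ _ ?_ h
        rw [h1]
        intro p hp
        rcases List.mem_append.mp hp with hp | hp
        · exact hq p (List.dropLast_subset _ hp)
        · obtain ⟨⟨d', hd', hzd'⟩, hg1, hg2, hg3, hg4, hg5, hg6⟩ := h3 p hp
          exact Relation.ReflTransGen.tail (hq pt hptq)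
            ⟨⟨d', hd', hzd'⟩, hg1, hg2, hg3, hg4, hg5, hg6⟩

lemma loop_false_closed (arr : List (List Int)) (down up : Int) :
    ∀ (fuel : Nat) (q : List (Int × Int)) (v : PySem.Set (Int × Int)),
      q.length + (arr.length * (arr.headD []).length - v.length) < fuel →
      v.Nodup →
      (∀ p ∈ v, 0 ≤ p.1 ∧ p.1 < (arr.length : Int) ∧ 0 ≤ p.2 ∧ p.2 < ((arr.headD []).length : Int)) →
      (∀ p ∈ q, p ∈ v) →
      (∀ p ∈ v, p ∉ q → ∀ z, StepC arr down up p z → z ∈ v) →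
      (pvTarget arr ∈ v → pvTarget arr ∈ q) →
      bfsLoop arr down up (arr.length : Int) ((arr.headD []).length : Int) (pvTarget arr) fuel q v = false →
      ∃ V : List (Int × Int), (∀ p ∈ v, p ∈ V) ∧
        (∀ p ∈ V, ∀ z, StepC arr down up p z → z ∈ V) ∧ pvTarget arr ∉ V := by
  intro fuel
  induction fuel with
  | zero => intro q v hfuel; omega
  | succ fuel ih =>
    intro q v hfuel hnd hbv hqv hclosed htq hfalse
    rw [bfsLoop] at hfalse
    cases hlast : q.getLast? with
    | none =>
      have hqnil : q = [] := List.getLast?_eq_none_iff.mp hlast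
      refine ⟨v, fun p hp => hp, ?_, ?_⟩
      · intro p hpv z hstep
        exact hclosed p hpv (by simp [hqnil]) z hstep
      · intro hT
        have := htq hT
        simp [hqnil] at this
    | some pt =>
      rw [hlast] at hfalse
      dsimp only at hfalse
      have hqne : q ≠ [] := by rintro rfl; simp at hlast
      have hqsplit : q.dropLast ++ [pt] = q := List.dropLast_append_getLast? pt hlast
      by_cases htgt : pt = pvTarget arr
      · rw [if_pos htgt] at hfalse
        simp at hfalse
      · rw [if_neg htgt] at hfalse
        obtain ⟨t, h1, h2, h3, h4, h5⟩ := fold_push_spec arr down up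
          (arr.length : Int) ((arr.headD []).length : Int) pt bfsDirs (q.dropLast, v)
        simp only at h1 h2 h4
        have hbt : ∀ p ∈ v ++ t, 0 ≤ p.1 ∧ p.1 < (arr.length : Int) ∧ 0 ≤ p.2 ∧
            p.2 < ((arr.headD []).length : Int) := by
          intro p hp
          rcases List.mem_append.mp hp with hp | hp
          · exact hbv p hp
          · obtain ⟨_, hg1, hg2, hg3, hg4, _, _⟩ := h3 p hp
            exact ⟨hg1, hg2, hg3, hg4⟩
        have hnd' : (v ++ t).Nodup := h5 hnd
        have hcard : (v ++ t).length ≤ arr.length * (arr.headD []).length :=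
          nodup_bounded_length (v ++ t) arr.length (arr.headD []).length hnd' hbt
        have hqlen : q.dropLast.length + 1 = q.length := by
          have := congrArg List.length hqsplit
          simpa using this
        have hqv' : ∀ p ∈ q.dropLast ++ t, p ∈ v ++ t := by
          intro p hp
          rcases List.mem_append.mp hp with hp | hp
          · exact List.mem_append_left _ (hqv p (by rw [← hqsplit]; exact List.mem_append_left _ hp))
          · exact List.mem_append_right _ hp
        have hclosed' : ∀ p ∈ v ++ t, p ∉ q.dropLast ++ t →
            ∀ z, StepC arr down up p z → z ∈ v ++ t := by
          intro p hpv hpq z hstep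
          rcases List.mem_append.mp hpv with hpv | hpv
          · by_cases hpq' : p ∈ q
            · rw [← hqsplit] at hpq'
              rcases List.mem_append.mp hpq' with hpq' | hpq'
              · exact absurd (List.mem_append_left _ hpq') hpq
              · have hppt : p = pt := by simpa using hpq'
                subst hppt
                obtain ⟨⟨d', hd', hzd'⟩, hg⟩ := hstep
                have := h4 d' hd' (by
                  rw [hzd'] at hg
                  exact ⟨hg.1, hg.2.1, hg.2.2.1, hg.2.2.2.1, hg.2.2.2.2.1, hg.2.2.2.2.2⟩)
                rw [← hzd'] at this
                exact this
            · exact List.mem_append_left _ (hclosed p hpv hpq' z hstep)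
          · exact absurd (List.mem_append_right _ hpv) hpq
        have htq' : pvTarget arr ∈ v ++ t → pvTarget arr ∈ q.dropLast ++ t := by
          intro hT
          rcases List.mem_append.mp hT with hT | hT
          · have := htq hT
            rw [← hqsplit] at this
            rcases List.mem_append.mp this with hT' | hT'
            · exact List.mem_append_left _ hT'
            · have hpt' : pvTarget arr = pt := by simpa using hT'
              exact absurd hpt'.symm htgt
          · exact List.mem_append_right _ hT
        obtain ⟨V, hV1, hV2, hV3⟩ := ih _ _ (by
            rw [h1, h2]
            simp only [List.length_append]
            rw [List.length_append] at hcard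
            omega)
          (by rw [h2]; exact hnd') (by rw [h2]; exact hbt)
          (by rw [h1, h2]; exact hqv') (by rw [h1, h2]; exact hclosed')
          (by rw [h1, h2]; exact htq') hfalse
        refine ⟨V, ?_, hV2, hV3⟩
        intro p hp
        refine hV1 p ?_
        rw [h2]
        exact List.mem_append_left _ hp

-- B-side lemmas ------------------------------------------------------------

lemma mem_sweepCell_mono (arr : List (List Int)) (down up x : Int)
    (r : PySem.Set (Int × Int)) (y : Int) (p : Int × Int) (hp : p ∈ r) :
    p ∈ sweepCell arr down up x r y := by
  unfold sweepCell
  split_ifs with h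
  · simp [PySem.Set.mem_add, hp]
  · exact hp

lemma mem_sweepCell_elim (arr : List (List Int)) (down up x : Int)
    (r : PySem.Set (Int × Int)) (y : Int) (p : Int × Int)
    (hp : p ∈ sweepCell arr down up x r y) :
    p ∈ r ∨ (p = (x, y) ∧ (down ≤ pyCell arr x y ∧ pyCell arr x y ≤ up) ∧
      ((x - 1, y) ∈ r ∨ (x + 1, y) ∈ r ∨ (x, y - 1) ∈ r ∨ (x, y + 1) ∈ r)) := by
  unfold sweepCell at hp
  split_ifs at hp with h
  · rw [PySem.Set.mem_add] at hp
    rcases hp with hp | hp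
    · exact Or.inl hp
    · exact Or.inr ⟨hp, h⟩
  · exact Or.inl hp

lemma sweepCell_prefix (arr : List (List Int)) (down up x : Int)
    (r : PySem.Set (Int × Int)) (y : Int) :
    ∃ t, sweepCell arr down up x r y = r ++ t := by
  unfold sweepCell
  split_ifs with h
  · rw [PySem.Set.add_eq_ite]
    split_ifs with h2
    · exact ⟨[], by simp⟩
    · exact ⟨[(x, y)], rfl⟩
  · exact ⟨[], by simp⟩

lemma sweep_prefix (arr : List (List Int)) (down up rows cols : Int)
    (r : PySem.Set (Int × Int)) : ∃ t, sweep arr down up rows cols r = r ++ t := by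
  unfold sweep
  apply foldl_preserve (fun r' => ∃ t, r' = r ++ t) _ _ _ _ ⟨[], by simp⟩
  intro a ha x _
  obtain ⟨t, ht⟩ := ha
  have hin : ∃ t', (PySem.List.pyRange 0 cols 1).foldl (sweepCell arr down up x) a = a ++ t' := by
    apply foldl_preserve (fun r' => ∃ t', r' = a ++ t') _ _ _ _ ⟨[], by simp⟩
    intro b hb y _
    obtain ⟨t', ht'⟩ := hb
    obtain ⟨t2, ht2⟩ := sweepCell_prefix arr down up x b y
    exact ⟨t' ++ t2, by rw [ht2, ht', List.append_assoc]⟩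
  obtain ⟨t', ht'⟩ := hin
  exact ⟨t ++ t', by rw [ht', ht, List.append_assoc]⟩

lemma mem_sweep_mono (arr : List (List Int)) (down up rows cols : Int)
    (r : PySem.Set (Int × Int)) (p : Int × Int) (hp : p ∈ r) :
    p ∈ sweep arr down up rows cols r := by
  obtain ⟨t, ht⟩ := sweep_prefix arr down up rows cols r
  rw [ht]
  exact List.mem_append_left _ hp

lemma sweep_nodup (arr : List (List Int)) (down up rows cols : Int)
    (r : PySem.Set (Int × Int)) (h : r.Nodup) : (sweep arr down up rows cols r).Nodup := by
  unfold sweep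
  apply foldl_preserve (fun r' : PySem.Set (Int × Int) => r'.Nodup) _ _ _ _ h
  intro a ha x _
  apply foldl_preserve (fun r' : PySem.Set (Int × Int) => r'.Nodup) _ _ _ _ ha
  intro b hb y _
  unfold sweepCell
  split_ifs with hc
  · exact PySem.Set.nodup_add _ _ hb
  · exact hb

lemma sweep_bounds (arr : List (List Int)) (down up rows cols : Int)
    (r : PySem.Set (Int × Int))
    (h : ∀ p ∈ r, 0 ≤ p.1 ∧ p.1 < rows ∧ 0 ≤ p.2 ∧ p.2 < cols) :
    ∀ p ∈ sweep arr down up rows cols r, 0 ≤ p.1 ∧ p.1 < rows ∧ 0 ≤ p.2 ∧ p.2 < cols := by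
  unfold sweep
  apply foldl_preserve
    (fun r' : PySem.Set (Int × Int) => ∀ p ∈ r', 0 ≤ p.1 ∧ p.1 < rows ∧ 0 ≤ p.2 ∧ p.2 < cols)
    _ _ _ _ h
  intro a ha x hx
  rw [PySem.List.mem_pyRange_one] at hx
  apply foldl_preserve
    (fun r' : PySem.Set (Int × Int) => ∀ p ∈ r', 0 ≤ p.1 ∧ p.1 < rows ∧ 0 ≤ p.2 ∧ p.2 < cols)
    _ _ _ _ ha
  intro b hb y hy
  rw [PySem.List.mem_pyRange_one] at hy
  intro p hp
  rcases mem_sweepCell_elim arr down up x b y p hp with hp | ⟨hp, _⟩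
  · exact hb p hp
  · subst hp
    exact ⟨hx.1, hx.2, hy.1, hy.2⟩

lemma sweep_sound (arr : List (List Int)) (down up : Int)
    (r : PySem.Set (Int × Int))
    (h : ∀ p ∈ r, ReachC arr down up p) :
    ∀ p ∈ sweep arr down up (arr.length : Int) ((arr.headD []).length : Int) r,
      ReachC arr down up p := by
  unfold sweep
  apply foldl_preserve
    (fun r' : PySem.Set (Int × Int) => ∀ p ∈ r', ReachC arr down up p) _ _ _ _ h
  intro a ha x hx
  rw [PySem.List.mem_pyRange_one] at hx
  apply foldl_preserve
    (fun r' : PySem.Set (Int × Int) => ∀ p ∈ r', ReachC arr down up p) _ _ _ _ ha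
  intro b hb y hy
  rw [PySem.List.mem_pyRange_one] at hy
  intro p hp
  rcases mem_sweepCell_elim arr down up x b y p hp with hp | ⟨hp, hrange, hnbr⟩
  · exact hb p hp
  subst hp
  have hgood : GoodC arr down up (x, y) := ⟨hx.1, hx.2, hy.1, hy.2, hrange.1, hrange.2⟩
  have : ∃ n, n ∈ b ∧ AdjC n (x, y) := by
    rcases hnbr with hn | hn | hn | hn
    · exact ⟨_, hn, (adj_rev _ _).mpr (Or.inl rfl)⟩
    · exact ⟨_, hn, (adj_rev _ _).mpr (Or.inr (Or.inl rfl))⟩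
    · exact ⟨_, hn, (adj_rev _ _).mpr (Or.inr (Or.inr (Or.inl rfl)))⟩
    · exact ⟨_, hn, (adj_rev _ _).mpr (Or.inr (Or.inr (Or.inr rfl)))⟩
  obtain ⟨n, hnb, hadj⟩ := this
  exact Relation.ReflTransGen.tail (hb n hnb) ⟨hadj, hgood⟩

lemma sweep_closed (arr : List (List Int)) (down up : Int)
    (r : PySem.Set (Int × Int)) (p z : Int × Int)
    (hg : GoodC arr down up z) (ha : AdjC p z) (hp : p ∈ r) :
    z ∈ sweep arr down up (arr.length : Int) ((arr.headD []).length : Int) r := by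
  obtain ⟨hz1, hz1', hz2, hz2', hv1, hv2⟩ := hg
  have hrow : ∀ (ys : List Int) (b : PySem.Set (Int × Int)), z.2 ∈ ys → p ∈ b →
      z ∈ ys.foldl (sweepCell arr down up z.1) b := by
    intro ys
    induction ys with
    | nil => intro b hy _; simp at hy
    | cons y ys ih =>
      intro b hy hpb
      rcases List.mem_cons.mp hy with hy | hy
      · have hzmem : z ∈ sweepCell arr down up z.1 b y := by
          unfold sweepCell
          rw [if_pos]
          · rw [PySem.Set.mem_add]
            right
            rw [← hy]
          · subst hy
            refine ⟨⟨hv1, hv2⟩, ?_⟩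
            rcases (adj_rev p z).mp ha with hpe | hpe | hpe | hpe <;> rw [← hpe] <;> tauto
        simp only [List.foldl_cons]
        apply foldl_preserve (fun r' : PySem.Set (Int × Int) => z ∈ r') _ _ _ _ hzmem
        intro b' hb' y' _
        exact mem_sweepCell_mono arr down up z.1 b' y' z hb'
      · simp only [List.foldl_cons]
        exact ih _ hy (mem_sweepCell_mono arr down up z.1 b y p hpb)
  have houter : ∀ (xs : List Int) (b : PySem.Set (Int × Int)), z.1 ∈ xs → p ∈ b →
      z ∈ xs.foldl (fun r' x => (PySem.List.pyRange 0 ((arr.headD []).length : Int) 1).foldl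
        (sweepCell arr down up x) r') b := by
    intro xs
    induction xs with
    | nil => intro b hx _; simp at hx
    | cons x xs ih =>
      intro b hx hpb
      rcases List.mem_cons.mp hx with hx | hx
      · subst hx
        simp only [List.foldl_cons]
        have hzin : z ∈ (PySem.List.pyRange 0 ((arr.headD []).length : Int) 1).foldl
            (sweepCell arr down up z.1) b := by
          apply hrow _ _ _ hpb
          rw [PySem.List.mem_pyRange_one]
          exact ⟨hz2, hz2'⟩
        apply foldl_preserve (fun r' : PySem.Set (Int × Int) => z ∈ r') _ _ _ _ hzin
        intro b' hb' x' _
        apply foldl_preserve (fun r' : PySem.Set (Int × Int) => z ∈ r') _ _ _ _ hb'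
        intro b'' hb'' y'' _
        exact mem_sweepCell_mono arr down up x' b'' y'' z hb''
      · simp only [List.foldl_cons]
        apply ih _ hx
        apply foldl_preserve (fun r' : PySem.Set (Int × Int) => p ∈ r') _ _ _ _ hpb
        intro b' hb' y' _
        exact mem_sweepCell_mono arr down up x b' y' p hb'
  unfold sweep
  apply houter _ _ _ hp
  rw [PySem.List.mem_pyRange_one]
  exact ⟨hz1, hz1'⟩

lemma iterate_preserve {α : Type} (f : α → α) (Q : α → Prop)
    (h : ∀ a, Q a → Q (f a)) : ∀ (k : Nat) (a : α), Q a → Q (f^[k] a) := by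
  intro k
  induction k with
  | zero => intro a ha; simpa using ha
  | succ k ih =>
    intro a ha
    rw [Function.iterate_succ_apply']
    exact h _ (ih a ha)

lemma iterate_growth (arr : List (List Int)) (down up rows cols : Int) :
    ∀ (m : Nat) (r : PySem.Set (Int × Int)), r.Nodup →
      (∀ p ∈ r, 0 ≤ p.1 ∧ p.1 < rows ∧ 0 ≤ p.2 ∧ p.2 < cols) →
      (∀ k < m, sweep arr down up rows cols ((sweep arr down up rows cols)^[k] r) ≠
        (sweep arr down up rows cols)^[k] r) →
      r.length + m ≤ ((sweep arr down up rows cols)^[m] r).length := by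
  intro m
  induction m with
  | zero => intro r _ _ _; simp
  | succ m ih =>
    intro r hnd hb hne
    have h0 : sweep arr down up rows cols r ≠ r := by simpa using hne 0 (by omega)
    obtain ⟨t, ht⟩ := sweep_prefix arr down up rows cols r
    have htne : t ≠ [] := by
      rintro rfl
      simp at ht
      exact h0 ht
    have hlen : r.length + 1 ≤ (sweep arr down up rows cols r).length := by
      rw [ht, List.length_append]
      have := List.length_pos_of_ne_nil htne
      omega
    have hne' : ∀ k < m, sweep arr down up rows cols
        ((sweep arr down up rows cols)^[k] (sweep arr down up rows cols r)) ≠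
        (sweep arr down up rows cols)^[k] (sweep arr down up rows cols r) := by
      intro k hk
      have := hne (k + 1) (by omega)
      rwa [Function.iterate_succ_apply] at this
    have := ih (sweep arr down up rows cols r)
      (sweep_nodup arr down up rows cols r hnd)
      (sweep_bounds arr down up rows cols r hb) hne'
    rw [Function.iterate_succ_apply]
    omega

lemma fix_at_N (arr : List (List Int)) (down up : Int)
    (h1 : arr ≠ []) (h2 : arr.headD [] ≠ []) :
    sweep arr down up (arr.length : Int) ((arr.headD []).length : Int)
      ((sweep arr down up (arr.length : Int) ((arr.headD []).length : Int))^[arr.length * (arr.headD []).length] (PySem.Set.ofList [((0:Int), (0:Int))])) =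
    (sweep arr down up (arr.length : Int) ((arr.headD []).length : Int))^[arr.length * (arr.headD []).length] (PySem.Set.ofList [((0:Int), (0:Int))]) := by
  set f := sweep arr down up (arr.length : Int) ((arr.headD []).length : Int) with hf
  set N := arr.length * (arr.headD []).length with hN
  set r0 : PySem.Set (Int × Int) := PySem.Set.ofList [((0:Int), (0:Int))] with hr0
  have hrows : 0 < arr.length := List.length_pos_of_ne_nil h1
  have hcols : 0 < (arr.headD []).length := List.length_pos_of_ne_nil h2
  have hr0nd : r0.Nodup := by simp [hr0, PySem.Set.ofList]
  have hr0b : ∀ p ∈ r0, 0 ≤ p.1 ∧ p.1 < (arr.length : Int) ∧ 0 ≤ p.2 ∧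
      p.2 < ((arr.headD []).length : Int) := by
    intro p hp
    have : p = ((0:Int), (0:Int)) := by
      simpa [hr0, PySem.Set.ofList] using hp
    subst this
    refine ⟨le_refl 0, ?_, le_refl 0, ?_⟩
    · show (0:Int) < (arr.length : Int)
      exact_mod_cast hrows
    · show (0:Int) < ((arr.headD []).length : Int)
      exact_mod_cast hcols
  by_cases hex : ∃ k, k < N ∧ f ((f)^[k] r0) = (f)^[k] r0
  · obtain ⟨k, hk, hfix⟩ := hex
    have hiter : (f)^[N] r0 = (f)^[k] r0 := by
      have : N = (N - k) + k := by omega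
      rw [this, Function.iterate_add_apply, Function.iterate_fixed hfix]
    rw [hiter]
    exact hfix
  · have hex' : ∀ k, k < N → f ((f)^[k] r0) ≠ (f)^[k] r0 := by
      intro k hk heq
      exact hex ⟨k, hk, heq⟩
    have hgrow : r0.length + N ≤ ((f)^[N] r0).length :=
      iterate_growth arr down up (arr.length : Int) ((arr.headD []).length : Int)
        N r0 hr0nd hr0b (by intro k hk; exact hex' k hk)
    have hbN : ∀ p ∈ (f)^[N] r0, 0 ≤ p.1 ∧ p.1 < (arr.length : Int) ∧ 0 ≤ p.2 ∧
        p.2 < ((arr.headD []).length : Int) :=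
      iterate_preserve f (fun r => ∀ p ∈ r, 0 ≤ p.1 ∧ p.1 < (arr.length : Int) ∧ 0 ≤ p.2 ∧
          p.2 < ((arr.headD []).length : Int))
        (fun r hr => sweep_bounds arr down up _ _ r hr) N r0 hr0b
    have hndN : ((f)^[N] r0).Nodup :=
      iterate_preserve f (fun r : PySem.Set (Int × Int) => r.Nodup)
        (fun r hr => sweep_nodup arr down up _ _ r hr) N r0 hr0nd
    have hcard := nodup_bounded_length ((f)^[N] r0) arr.length (arr.headD []).length hndN hbN
    have hlen1 : r0.length = 1 := by simp [hr0, PySem.Set.ofList]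
    omega

lemma breakfold_stuck (arr : List (List Int)) (down up rows cols : Int) :
    ∀ (l : List Int) (st : PySem.Set (Int × Int) × Bool), st.2 = true →
      l.foldl (sweepStep arr down up rows cols) st = st := by
  intro l
  induction l with
  | nil => intro st _; rfl
  | cons a l ih =>
    intro st hst
    simp only [List.foldl_cons, sweepStep, hst, if_true]
    exact ih st hst

lemma breakfold_eq (arr : List (List Int)) (down up rows cols : Int) :
    ∀ (l : List Int) (r : PySem.Set (Int × Int)),
      (l.foldl (sweepStep arr down up rows cols) (r, false)).1 =
      (sweep arr down up rows cols)^[l.length] r := by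
  intro l
  induction l with
  | nil => intro r; rfl
  | cons a l ih =>
    intro r
    simp only [List.foldl_cons, List.length_cons]
    by_cases hlen : (sweep arr down up rows cols r).length = r.length
    · have hfix : sweep arr down up rows cols r = r := by
        obtain ⟨t, ht⟩ := sweep_prefix arr down up rows cols r
        have : t = [] := by
          have := congrArg List.length ht
          simp at this
          exact List.eq_nil_of_length_eq_zero (by omega)
        rw [this] at ht
        simpa using ht
      have hstep : sweepStep arr down up rows cols (r, false) a =
          (sweep arr down up rows cols r, true) := by
        simp [sweepStep, hlen]
      rw [hstep, breakfold_stuck arr down up rows cols l _ rfl]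
      simp only [hfix]
      rw [Function.iterate_fixed hfix]
    · have hstep : sweepStep arr down up rows cols (r, false) a =
          (sweep arr down up rows cols r, false) := by
        simp [sweepStep, hlen]
      rw [hstep, ih]
      rw [Function.iterate_succ_apply]

lemma alt_true_iff (arr : List (List Int)) (down up : Int)
    (hpre : Pre_bfs arr down up) :
    ∀ (hg : (down ≤ pyCell arr 0 0 ∧ pyCell arr 0 0 ≤ up) ∧
      (down ≤ pyCell arr (-1) (-1) ∧ pyCell arr (-1) (-1) ≤ up)),
      (bfs_alt arr down up = true ↔ ReachC arr down up (pvTarget arr)) := by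
  intro hg
  obtain ⟨h1, h2, _⟩ := hpre
  have hof : PySem.Set.ofList [((0:Int), (0:Int))] = [((0:Int), (0:Int))] := rfl
  unfold bfs_alt
  rw [if_pos hg]
  dsimp only
  rw [breakfold_eq]
  have hlen : (PySem.List.pyRange 0 ((arr.length : Int) * ((arr.headD []).length : Int)) 1).length
      = arr.length * (arr.headD []).length := by
    rw [PySem.List.length_pyRange_one, sub_zero, ← Nat.cast_mul, Int.toNat_natCast]
  rw [hlen, decide_eq_true_iff]
  constructor
  · intro hmem
    refine iterate_preserve (sweep arr down up (arr.length : Int) ((arr.headD []).length : Int))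
      (fun r => ∀ p ∈ r, ReachC arr down up p)
      (fun r hr => sweep_sound arr down up r hr)
      (arr.length * (arr.headD []).length) _ ?_ _ hmem
    intro p hp
    have : p = ((0:Int), (0:Int)) := by simpa [hof] using hp
    subst this
    exact Relation.ReflTransGen.refl
  · intro hr
    have hall : ∀ z, ReachC arr down up z →
        z ∈ (sweep arr down up (arr.length : Int) ((arr.headD []).length : Int))^[arr.length * (arr.headD []).length] (PySem.Set.ofList [((0:Int), (0:Int))]) := by
      intro z hz
      induction hz with
      | refl =>
        refine iterate_preserve (sweep arr down up (arr.length : Int) ((arr.headD []).length : Int))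
          (fun r => ((0:Int), (0:Int)) ∈ r)
          (fun r hr => mem_sweep_mono arr down up _ _ r _ hr)
          (arr.length * (arr.headD []).length) _ ?_
        simp [hof]
      | tail hab hbc ih =>
        rw [← fix_at_N arr down up h1 h2]
        exact sweep_closed arr down up _ _ _ hbc.2 hbc.1 ih
    exact hall _ hr

lemma a_true_iff (arr : List (List Int)) (down up : Int)
    (hpre : Pre_bfs arr down up) :
    ∀ (hg : (down ≤ pyCell arr 0 0 ∧ pyCell arr 0 0 ≤ up) ∧
      (down ≤ pyCell arr (-1) (-1) ∧ pyCell arr (-1) (-1) ≤ up)),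
      (bfs arr down up = true ↔ ReachC arr down up (pvTarget arr)) := by
  intro hg
  obtain ⟨h1, h2, _⟩ := hpre
  have hrows : 0 < arr.length := List.length_pos_of_ne_nil h1
  have hcols : 0 < (arr.headD []).length := List.length_pos_of_ne_nil h2
  have hN : 1 ≤ arr.length * (arr.headD []).length := Nat.mul_pos hrows hcols
  have hof : PySem.Set.ofList [((0:Int), (0:Int))] = [((0:Int), (0:Int))] := rfl
  constructor
  · intro h
    unfold bfs at h
    rw [if_pos hg] at h
    refine loop_true_reach arr down up _ _ _ ?_ h
    intro p hp
    have : p = ((0:Int), (0:Int)) := by simpa using hp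
    subst this
    exact Relation.ReflTransGen.refl
  · intro hr
    by_contra hfb
    have hfalse : bfs arr down up = false := by
      cases hbv : bfs arr down up
      · rfl
      · exact absurd hbv hfb
    unfold bfs at hfalse
    rw [if_pos hg] at hfalse
    obtain ⟨V, hV1, hV2, hV3⟩ := loop_false_closed arr down up
      (arr.length * (arr.headD []).length + 1) [((0:Int), (0:Int))]
      (PySem.Set.ofList [((0:Int), (0:Int))])
      (by rw [hof]; simp only [List.length_singleton]; omega)
      (by rw [hof]; simp)
      (by
        rw [hof]
        intro p hp
        have : p = ((0:Int), (0:Int)) := by simpa using hp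
        subst this
        refine ⟨le_refl 0, ?_, le_refl 0, ?_⟩
        · show (0:Int) < (arr.length : Int)
          exact_mod_cast hrows
        · show (0:Int) < ((arr.headD []).length : Int)
          exact_mod_cast hcols)
      (by rw [hof]; intro p hp; exact hp)
      (by
        rw [hof]
        intro p hp hpq
        exfalso
        have : p = ((0:Int), (0:Int)) := by simpa using hp
        subst this
        exact hpq (by simp))
      (by rw [hof]; intro hT; exact hT)
      hfalse
    have hall : ∀ z, ReachC arr down up z → z ∈ V := by
      intro z hz
      induction hz with
      | refl => exact hV1 _ (by rw [hof]; simp)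
      | tail hab hbc ih => exact hV2 _ ih _ hbc
    exact hV3 (hall _ hr)

-- ===== VERDICT (by name: the statement is the Claim_ definition above) =====
theorem bfs_spec : Claim_equal_bfs := by
  unfold Claim_equal_bfs
  intro arr down up hdom hpre
  unfold Spec_bfs
  by_cases hg : (down ≤ pyCell arr 0 0 ∧ pyCell arr 0 0 ≤ up) ∧
      (down ≤ pyCell arr (-1) (-1) ∧ pyCell arr (-1) (-1) ≤ up)
  · have ha := a_true_iff arr down up hpre hg
    have hb := alt_true_iff arr down up hpre hg
    by_cases hr : ReachC arr down up (pvTarget arr)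
    · rw [ha.mpr hr, hb.mpr hr]
    · have ha' : bfs arr down up = false := by
        cases h : bfs arr down up
        · rfl
        · exact absurd (ha.mp h) hr
      have hb' : bfs_alt arr down up = false := by
        cases h : bfs_alt arr down up
        · rfl
        · exact absurd (hb.mp h) hr
      rw [ha', hb']
  · unfold bfs bfs_alt
    rw [if_neg hg, if_neg hg]
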